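-- pv_equiv track=rewrite | github.com/cybelewang/leetcode-python | code30SubstringWithConcatenationOfAllWords.py | findSubstring3
-- ===== SOURCE A (Python) =====
-- def findSubstring3(s, words):
--     if not s or not words or not words[0]:
--         return []
--     n = len(s)
--     k = len(words[0])
--     t = len(words) * k
--     req = {}
--     for w in words:
--         req[w] = req[w] + 1 if w in req else 1
--     ans = []
--     for i in range(min(k, n - t + 1)):
--         findSubstring4(i, n, k, t, s, req, ans)
--     return ans
--
-- def findSubstring4(l, n , k, t, s, req, ans):
--     curr = {}
--
--     for i in range(l, l + t, k):
--         substr = s[i : i+k]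
--         if substr in req:
--             curr[substr] = curr[substr] + 1 if substr in curr else 1
--
--     if curr == req:
--         ans.append(l)
--
--     left = s[l : l+k]
--     l += k
--     r = l + t
--     while r <= n:
--         right = s[r-k : r]
--         if left in curr:
--             curr[left] = curr[left] - 1 if curr[left] > 0 else 0
--         if right in req:
--             curr[right] = curr[right] + 1 if right in curr else 1
--         if curr == req:
--             ans.append(l)
--         left = s[l : l+k]
--         l += k
--         r = l + t
-- ===== SOURCE B (Python) =====
-- def findSubstring3(s, words):
--     if not s or not words or not words[0]:
--         return []
--     n = len(s)
--     k = len(words[0])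
--     t = len(words) * k
--     target = sorted(words)
--     ans = []
--     for off in range(min(k, n - t + 1)):
--         for l in range(off, n - t + 1, k):
--             if sorted([s[j:j+k] for j in range(l, l + t, k)]) == target:
--                 ans.append(l)
--     return ans
-- ===== Notes on version B (the rewrite author's own statement) =====
-- stated objective: simpler
-- what changed: A slides a per-offset count dict along the string, updating it incrementally and comparing it to the requirement dict at every step; B drops the dicts entirely and, for each candidate start, sorts the window's chunk list and compares it with sorted(words).
import Mathlib
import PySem

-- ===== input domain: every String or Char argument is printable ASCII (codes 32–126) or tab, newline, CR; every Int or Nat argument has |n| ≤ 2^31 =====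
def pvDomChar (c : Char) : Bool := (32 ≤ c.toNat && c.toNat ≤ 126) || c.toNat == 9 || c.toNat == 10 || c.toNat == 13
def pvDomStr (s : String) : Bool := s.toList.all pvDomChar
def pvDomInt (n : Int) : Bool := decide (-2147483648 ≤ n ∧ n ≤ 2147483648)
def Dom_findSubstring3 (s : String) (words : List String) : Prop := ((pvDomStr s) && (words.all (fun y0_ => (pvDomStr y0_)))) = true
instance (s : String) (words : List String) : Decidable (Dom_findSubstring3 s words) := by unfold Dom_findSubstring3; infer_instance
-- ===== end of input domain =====

-- B replaces A's incrementally maintained per-offset count dict (compared to the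
-- requirement dict at every step) by a direct per-start check that sorts the window's
-- chunk list and compares it with sorted(words); objective: a simpler, dict-free check.

-- ===== PORT A =====
-- Python 'curr == req' on dicts: same key set and same value at every key (order-insensitive).
def pvDictEq (d1 d2 : PySem.Dict String Int) : Bool :=
  PySem.Set.equal d1.keys d2.keys && d1.keys.all (fun w => d1.get? w == d2.get? w)

-- the 'while r <= n' loop of findSubstring4 (l already advanced past the first window)
def pvFs4Loop (n k t : Int) (s : String) (req : PySem.Dict String Int)
    (curr : PySem.Dict String Int) (ans : List Int) (left : String) (l : Int) : List Int :=
  if _hk : k ≤ 0 then ans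
  else
    let r := l + t
    if _hr : r ≤ n then
      let right := PySem.Str.slice s (some (r - k)) (some r)
      let curr1 := if curr.contains left then
          curr.insert left (if curr.getD left 0 > 0 then curr.getD left 0 - 1 else 0) else curr
      let curr2 := if req.contains right then
          curr1.insert right (if curr1.contains right then curr1.getD right 0 + 1 else 1) else curr1
      let ans1 := if pvDictEq curr2 req then ans ++ [l] else ans
      pvFs4Loop n k t s req curr2 ans1 (PySem.Str.slice s (some l) (some (l + k))) (l + k)
    else ans
termination_by (n - t - l + 1).toNat
decreasing_by omega

def findSubstring4 (l n k t : Int) (s : String) (req : PySem.Dict String Int)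
    (ans : List Int) : List Int :=
  let curr := (PySem.List.pyRange l (l + t) k).foldl (fun c i =>
      let substr := PySem.Str.slice s (some i) (some (i + k))
      if req.contains substr then
        c.insert substr (if c.contains substr then c.getD substr 0 + 1 else 1)
      else c)
    PySem.Dict.empty
  let ans1 := if pvDictEq curr req then ans ++ [l] else ans
  pvFs4Loop n k t s req curr ans1 (PySem.Str.slice s (some l) (some (l + k))) (l + k)

def findSubstring3 (s : String) (words : List String) : List Int :=
  if s = "" ∨ words = [] ∨ words.headD "" = "" then []
  else
    let n := PySem.Str.len s
    let k := PySem.Str.len (words.headD "")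
    let t := PySem.List.len words * k
    let req := words.foldl
      (fun d w => d.insert w (if d.contains w then d.getD w 0 + 1 else 1)) PySem.Dict.empty
    (PySem.List.pyRange 0 (min k (n - t + 1)) 1).foldl
      (fun ans i => findSubstring4 i n k t s req ans) []

-- ===== PORT B =====
def findSubstring3_alt (s : String) (words : List String) : List Int :=
  if s = "" ∨ words = [] ∨ words.headD "" = "" then []
  else
    let n := PySem.Str.len s
    let k := PySem.Str.len (words.headD "")
    let t := PySem.List.len words * k
    let target := PySem.List.sorted words (fun w => w) false
    (PySem.List.pyRange 0 (min k (n - t + 1)) 1).foldl (fun ans off =>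
      (PySem.List.pyRange off (n - t + 1) k).foldl (fun ans l =>
        if PySem.List.sorted ((PySem.List.pyRange l (l + t) k).map
            (fun j => PySem.Str.slice s (some j) (some (j + k)))) (fun w => w) false = target
        then ans ++ [l] else ans) ans) []

-- ===== PRECONDITION & SPEC =====
def Spec_findSubstring3 (s : String) (words : List String) (out : List Int) : Prop := out = findSubstring3_alt s words
instance (s : String) (words : List String) (out : List Int) : Decidable (Spec_findSubstring3 s words out) := by unfold Spec_findSubstring3; infer_instance

-- ===== CLAIM (what is proved, stated in full; the proofs are below) =====
def Claim_equal_findSubstring3 : Prop := ∀ (s : String) (words : List String), Dom_findSubstring3 s words → Spec_findSubstring3 s words (findSubstring3 s words)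


-- ===== LEMMAS AND PROOFS =====

-- proof-side abbreviations: the chunk at position j, the chunk list of the window of
-- length t starting at a, and the chunks seen so far by offset off when the loop variable is l
def pvCh (s : String) (k j : Int) : String := PySem.Str.slice s (some j) (some (j + k))
def pvWL (s : String) (k t a : Int) : List String :=
  (PySem.List.pyRange a (a + t) k).map (pvCh s k)
def pvSeen (s : String) (k t off l : Int) : List String :=
  (PySem.List.pyRange off (l + t - k) k).map (pvCh s k)

lemma pvDictEq_iff (d1 d2 : PySem.Dict String Int) :
    pvDictEq d1 d2 = true ↔ ∀ w, d1.get? w = d2.get? w := by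
  unfold pvDictEq
  rw [Bool.and_eq_true, PySem.Set.equal_iff, List.all_eq_true]
  constructor
  · rintro ⟨hkeys, hvals⟩ w
    by_cases h : w ∈ d1.keys
    · exact eq_of_beq (hvals w h)
    · have h2 : w ∉ d2.keys := fun hm => h ((hkeys w).2 hm)
      rw [(PySem.Dict.get?_eq_none_iff_contains d1 w).2 (by
            rw [← Bool.not_eq_true, PySem.Dict.contains_iff_mem_keys]; exact h),
          (PySem.Dict.get?_eq_none_iff_contains d2 w).2 (by
            rw [← Bool.not_eq_true, PySem.Dict.contains_iff_mem_keys]; exact h2)]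
  · intro h
    refine ⟨fun w => ?_, fun w _ => beq_iff_eq.2 (h w)⟩
    rw [← PySem.Dict.contains_iff_mem_keys, ← PySem.Dict.contains_iff_mem_keys,
        PySem.Dict.contains_eq_isSome_get?, PySem.Dict.contains_eq_isSome_get?, h w]

lemma pyRangeK_nil (a b k : Int) (hk : 0 < k) (h : b ≤ a) : PySem.List.pyRange a b k = [] := by
  rw [PySem.List.pyRange_of_pos _ _ hk]; simp [show ¬ a < b by omega]

lemma pyRangeK_cons (a b k : Int) (hk : 0 < k) (h : a < b) :
    PySem.List.pyRange a b k = a :: PySem.List.pyRange (a + k) b k := by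
  rw [PySem.List.pyRange_of_pos _ _ hk, PySem.List.pyRange_of_pos _ _ hk]
  have hdiv : ∀ x q : Int, q * k ≤ x → x < (q + 1) * k → x / k = q := by
    intro x q h1 h2
    rw [← PySem.Int.floordiv_eq_ediv_of_pos (a:=x) hk]
    exact (PySem.Int.floordiv_eq_iff_of_pos (a:=x) (b:=k) (q:=q) hk).2 ⟨h1, h2⟩
  have hN : ((b - a + k - 1) / k).toNat
      = (if a + k < b then ((b - (a + k) + k - 1) / k).toNat else 0) + 1 := by
    by_cases hb : a + k < b
    · simp only [hb, if_true]
      have h1 : b - a + k - 1 = (b - (a + k) + k - 1) + 1 * k := by ring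
      rw [h1, Int.add_mul_ediv_right _ _ (by omega : k ≠ 0)]
      have h2 : 0 ≤ (b - (a + k) + k - 1) / k := Int.ediv_nonneg (by omega) (by omega)
      omega
    · simp only [hb, if_false]
      have : (b - a + k - 1) / k = 1 := hdiv _ _ (by omega) (by omega)
      omega
  rw [if_pos h, hN, List.range_succ_eq_map]
  simp only [List.map_cons, List.map_map, Nat.cast_zero, mul_zero, add_zero]
  congr 1
  refine List.map_congr_left fun j _ => ?_
  simp only [Function.comp_apply, Nat.succ_eq_add_one]
  push_cast
  ring

lemma pyRangeK_eq (a k : Int) (hk : 0 < k) (m : Nat) :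
    PySem.List.pyRange a (a + k * m) k = (List.range m).map (fun (j : Nat) => a + k * (j : Int)) := by
  induction m generalizing a with
  | zero =>
    rw [show a + k * ((0:Nat):Int) = a by push_cast; ring]
    exact pyRangeK_nil a a k hk le_rfl
  | succ m ih =>
    rw [pyRangeK_cons a _ k hk (by push_cast; nlinarith),
        show a + k * ((m+1:Nat):Int) = (a + k) + k * (m:Int) by push_cast; ring,
        ih (a + k), List.range_succ_eq_map]
    simp only [List.map_cons, List.map_map, Nat.cast_zero, mul_zero, add_zero]
    congr 1
    refine List.map_congr_left fun j _ => ?_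
    simp only [Function.comp_apply, Nat.succ_eq_add_one]
    push_cast
    ring

lemma pyRangeK_snoc (a k : Int) (hk : 0 < k) (m : Nat) :
    PySem.List.pyRange a (a + k * (m + 1)) k
      = PySem.List.pyRange a (a + k * m) k ++ [a + k * m] := by
  rw [show a + k * ((m:Int) + 1) = a + k * (((m+1:Nat)):Int) by push_cast; ring]
  rw [pyRangeK_eq a k hk (m+1), pyRangeK_eq a k hk m, List.range_succ, List.map_append]
  simp

lemma counterStep (words : List String) (req : PySem.Dict String Int)
    (hc : ∀ x, req.contains x = decide (x ∈ words)) (L : List String) (x : String)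
    (D : PySem.Dict String Int)
    (hD : ∀ w, D.get? w = if w ∈ words ∧ w ∈ L then some ((List.count w L : Int)) else none) :
    ∀ w, (if req.contains x then D.insert x (if D.contains x then D.getD x 0 + 1 else 1)
        else D).get? w
      = if w ∈ words ∧ w ∈ L ++ [x] then some ((List.count w (L ++ [x]) : Int)) else none := by
  intro w
  by_cases hxw : x ∈ words
  · rw [hc x, if_pos (by simpa using hxw)]
    have hcont : D.contains x = decide (x ∈ L) := by
      rw [PySem.Dict.contains_eq_isSome_get?, hD x]
      by_cases hxL : x ∈ L
      · rw [if_pos ⟨hxw, hxL⟩]; simp [hxL]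
      · rw [if_neg (by tauto)]; simp [hxL]
    have hgd : D.getD x 0 = (List.count x L : Int) := by
      rw [PySem.Dict.getD_eq_get?_getD, hD x]
      by_cases hxL : x ∈ L
      · rw [if_pos ⟨hxw, hxL⟩]; rfl
      · rw [if_neg (by tauto)]; simp [List.count_eq_zero.2 hxL]
    have hval : (if D.contains x then D.getD x 0 + 1 else (1:Int))
        = (List.count x L : Int) + 1 := by
      rw [hcont, hgd]
      by_cases hxL : x ∈ L
      · simp [hxL]
      · simp [hxL, List.count_eq_zero.2 hxL]
    rw [hval, PySem.Dict.get?_insert]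
    by_cases hwx : w = x
    · subst hwx
      rw [if_pos rfl, if_pos ⟨hxw, by simp⟩]
      simp [List.count_append]
    · rw [if_neg hwx, hD w]
      have hmem : (w ∈ L ++ [x]) ↔ w ∈ L := by simp [hwx]
      have hcnt : List.count w (L ++ [x]) = List.count w L := by
        simp [List.count_append, Ne.symm hwx]
      by_cases hwL : w ∈ words ∧ w ∈ L
      · rw [if_pos hwL, if_pos ⟨hwL.1, hmem.2 hwL.2⟩, hcnt]
      · rw [if_neg hwL, if_neg (by rw [hmem] at *; tauto)]
  · rw [hc x, if_neg (by simpa using hxw), hD w]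
    have hwx : w ∈ words → w ≠ x := fun hw he => hxw (he ▸ hw)
    by_cases hwL : w ∈ words ∧ w ∈ L
    · have hne := hwx hwL.1
      rw [if_pos hwL, if_pos ⟨hwL.1, by simp [hwL.2]⟩]
      simp [List.count_append, Ne.symm hne]
    · rw [if_neg hwL, if_neg (by
        rintro ⟨hw, hm⟩
        rcases List.mem_append.1 hm with h | h
        · exact hwL ⟨hw, h⟩
        · simp at h; exact hwx hw h)]

-- the initial per-offset counting loop builds the counter of the first window's in-req chunks
lemma initCounter (words : List String) (req : PySem.Dict String Int)
    (hc : ∀ x, req.contains x = decide (x ∈ words)) (L : List String) :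
    ∀ w, (L.foldl (fun c x =>
        if req.contains x then c.insert x (if c.contains x then c.getD x 0 + 1 else 1) else c)
      PySem.Dict.empty).get? w
    = if w ∈ words ∧ w ∈ L then some ((List.count w L : Int)) else none := by
  induction L using List.reverseRecOn with
  | nil => intro w; simp [PySem.Dict.get?_empty]
  | append_singleton L x ih =>
    intro w
    rw [List.foldl_append, List.foldl_cons, List.foldl_nil]
    exact counterStep words req hc L x _ ih w

-- while-loop body, first half: remove 'left' (the chunk leaving the window)
lemma dictDec (words : List String) (curr : PySem.Dict String Int)
    (S MidW : List String) (left : String) (hleftS : left ∈ S)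
    (Hcurr : ∀ w, curr.get? w =
      if w ∈ words ∧ w ∈ S then some ((List.count w (left :: MidW) : Int)) else none) :
    ∀ w,
      (if curr.contains left then
          curr.insert left (if curr.getD left 0 > 0 then curr.getD left 0 - 1 else 0)
        else curr).get? w
      = if w ∈ words ∧ w ∈ S then some ((List.count w MidW : Int)) else none := by
  intro w
  have hcontl : curr.contains left = decide (left ∈ words) := by
    rw [PySem.Dict.contains_eq_isSome_get?, Hcurr left]
    by_cases h : left ∈ words
    · rw [if_pos ⟨h, hleftS⟩]; simp [h]
    · rw [if_neg (by tauto)]; simp [h]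
  by_cases hlw : left ∈ words
  · rw [hcontl, if_pos (by simpa using hlw)]
    have hgd : curr.getD left 0 = (List.count left (left :: MidW) : Int) := by
      rw [PySem.Dict.getD_eq_get?_getD, Hcurr left, if_pos ⟨hlw, hleftS⟩]; rfl
    have hcl : List.count left (left :: MidW) = List.count left MidW + 1 := by
      simp
    have hval : (if curr.getD left 0 > 0 then curr.getD left 0 - 1 else (0:Int))
        = (List.count left MidW : Int) := by
      rw [hgd, hcl]
      have : (0:Int) < ((List.count left MidW + 1 : Nat) : Int) := by positivity
      rw [if_pos (by push_cast at this ⊢; omega)]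
      push_cast; ring
    rw [hval, PySem.Dict.get?_insert]
    by_cases hwl : w = left
    · subst hwl; rw [if_pos rfl, if_pos ⟨hlw, hleftS⟩]
    · rw [if_neg hwl, Hcurr w]
      have hcnt : List.count w (left :: MidW) = List.count w MidW := by
        simp [Ne.symm hwl]
      rw [hcnt]
  · rw [hcontl, if_neg (by simpa using hlw), Hcurr w]
    by_cases hw : w ∈ words ∧ w ∈ S
    · have hne : w ≠ left := fun he => hlw (he ▸ hw.1)
      rw [if_pos hw, if_pos hw]
      have : List.count w (left :: MidW) = List.count w MidW := by
        simp [Ne.symm hne]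
      rw [this]
    · rw [if_neg hw, if_neg hw]

-- while-loop body, second half: add 'right' (the chunk entering the window)
lemma dictInc (words : List String) (req curr1 : PySem.Dict String Int)
    (S MidW : List String) (right : String)
    (hreqc : ∀ x, req.contains x = decide (x ∈ words))
    (hMidS : ∀ x ∈ MidW, x ∈ S)
    (Hcurr1 : ∀ w, curr1.get? w =
      if w ∈ words ∧ w ∈ S then some ((List.count w MidW : Int)) else none) :
    ∀ w,
      (if req.contains right then
          curr1.insert right (if curr1.contains right then curr1.getD right 0 + 1 else 1)
        else curr1).get? w
      = if w ∈ words ∧ w ∈ S ++ [right] then some ((List.count w (MidW ++ [right]) : Int)) else none := by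
  intro w
  have hnotS : right ∉ S → List.count right MidW = 0 :=
    fun h => List.count_eq_zero.2 fun hm => h (hMidS _ hm)
  by_cases hrw : right ∈ words
  · rw [hreqc right, if_pos (by simpa using hrw)]
    have hcont : curr1.contains right = decide (right ∈ S) := by
      rw [PySem.Dict.contains_eq_isSome_get?, Hcurr1 right]
      by_cases h : right ∈ S
      · rw [if_pos ⟨hrw, h⟩]; simp [h]
      · rw [if_neg (by tauto)]; simp [h]
    have hval : (if curr1.contains right then curr1.getD right 0 + 1 else (1:Int))
        = (List.count right MidW : Int) + 1 := by
      rw [hcont]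
      by_cases h : right ∈ S
      · rw [if_pos (by simpa using h), PySem.Dict.getD_eq_get?_getD, Hcurr1 right,
            if_pos ⟨hrw, h⟩]; rfl
      · rw [if_neg (by simpa using h), hnotS h]; simp
    rw [hval, PySem.Dict.get?_insert]
    by_cases hwr : w = right
    · subst hwr
      rw [if_pos rfl, if_pos ⟨hrw, by simp⟩]
      simp [List.count_append]
    · rw [if_neg hwr, Hcurr1 w]
      have hmem : (w ∈ S ++ [right]) ↔ w ∈ S := by simp [hwr]
      have hcnt : List.count w (MidW ++ [right]) = List.count w MidW := by
        simp [List.count_append, Ne.symm hwr]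
      by_cases hw : w ∈ words ∧ w ∈ S
      · rw [if_pos hw, if_pos ⟨hw.1, hmem.2 hw.2⟩, hcnt]
      · rw [if_neg hw, if_neg (by rw [hmem] at *; tauto)]
  · rw [hreqc right, if_neg (by simpa using hrw), Hcurr1 w]
    have hwr : w ∈ words → w ≠ right := fun hw he => hrw (he ▸ hw)
    by_cases hw : w ∈ words ∧ w ∈ S
    · have hne := hwr hw.1
      rw [if_pos hw, if_pos ⟨hw.1, by simp [hw.2]⟩]
      simp [List.count_append, Ne.symm hne]
    · rw [if_neg hw, if_neg (by
        rintro ⟨hww, hm⟩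
        rcases List.mem_append.1 hm with h | h
        · exact hw ⟨hww, h⟩
        · simp at h; exact hwr hww h)]

lemma dictEqChar (words : List String) (req curr : PySem.Dict String Int)
    (Wl S : List String)
    (hreqGet : ∀ w, req.get? w = if w ∈ words then some ((List.count w words : Int)) else none)
    (hWS : ∀ x ∈ Wl, x ∈ S) (hlen : Wl.length = words.length)
    (Hcurr : ∀ w, curr.get? w =
      if w ∈ words ∧ w ∈ S then some ((List.count w Wl : Int)) else none) :
    pvDictEq curr req = true ↔ Wl.Perm words := by
  rw [pvDictEq_iff]
  constructor
  · intro h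
    have hcnt : ∀ w ∈ words, List.count w Wl = List.count w words := by
      intro w hw
      have := (Hcurr w).symm.trans ((h w).trans (hreqGet w))
      rw [if_pos hw] at this
      by_cases hS : w ∈ S
      · rw [if_pos ⟨hw, hS⟩] at this
        exact_mod_cast Option.some.inj this
      · rw [if_neg (by tauto)] at this; exact absurd this (by simp)
    rw [← Multiset.coe_eq_coe]
    symm
    apply Multiset.eq_of_le_of_card_le
    · rw [Multiset.le_iff_count]
      intro a
      rw [Multiset.coe_count, Multiset.coe_count]
      by_cases ha : a ∈ words
      · rw [hcnt a ha]
      · simp [List.count_eq_zero.2 ha]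
    · simpa [Multiset.coe_card] using hlen.le
  · intro hperm w
    rw [Hcurr w, hreqGet w]
    by_cases hw : w ∈ words
    · have hcnt : List.count w Wl = List.count w words := hperm.count_eq w
      have hmem : w ∈ Wl := by
        rw [← List.count_pos_iff, hcnt, List.count_pos_iff]; exact hw
      rw [if_pos ⟨hw, hWS w hmem⟩, if_pos hw, hcnt]
    · rw [if_neg (by tauto), if_neg hw]

lemma reqGet (words : List String) (w : String) :
    (words.foldl (fun d w => d.insert w (if d.contains w then d.getD w 0 + 1 else 1))
      PySem.Dict.empty).get? w
    = if w ∈ words then some ((List.count w words : Int)) else none := by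
  have hbody : (fun (d : PySem.Dict String Int) w =>
        d.insert w (if d.contains w then d.getD w 0 + 1 else 1))
      = fun d w => d.insert w (d.getD w 0 + 1) := by
    funext d w
    by_cases h : d.contains w
    · simp [h]
    · simp [Bool.not_eq_true] at h
      simp [h, PySem.Dict.getD_of_not_contains d 0 h]
  rw [hbody]
  have hkeys : (words.foldl (fun (d : PySem.Dict String Int) w => d.insert w (d.getD w 0 + 1))
      PySem.Dict.empty).keys = PySem.Set.ofList words := by
    rw [PySem.Dict.keys_foldl_insert words (fun d x => d.getD x 0 + 1) PySem.Dict.empty]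
    simp [PySem.Dict.keys_empty, PySem.Set.update_nil_left]
  have hgetD := PySem.Dict.getD_foldl_insert_add_one words PySem.Dict.empty w
  rw [PySem.Dict.getD_empty] at hgetD
  by_cases h : w ∈ words
  · rw [if_pos h]
    have hc : (words.foldl (fun (d : PySem.Dict String Int) w => d.insert w (d.getD w 0 + 1))
        PySem.Dict.empty).contains w = true := by
      rw [PySem.Dict.contains_iff_mem_keys, hkeys, PySem.Set.mem_ofList]; exact h
    rw [PySem.Dict.contains_eq_isSome_get?] at hc
    cases hg : (words.foldl (fun (d : PySem.Dict String Int) w => d.insert w (d.getD w 0 + 1))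
        PySem.Dict.empty).get? w with
    | none => rw [hg] at hc; simp at hc
    | some v =>
      rw [PySem.Dict.getD_eq_get?_getD, hg] at hgetD
      simp at hgetD
      exact congrArg some hgetD
  · rw [if_neg h, PySem.Dict.get?_eq_none_iff_contains]
    rw [← Bool.not_eq_true, PySem.Dict.contains_iff_mem_keys, hkeys, PySem.Set.mem_ofList]
    exact h


-- the while loop of findSubstring4: appends exactly the matching window starts, in order
lemma loopEq (s : String) (words : List String) (req : PySem.Dict String Int)
    (n k t off : Int) (hk : 0 < k) (ht : t = k * (words.length : Int))
    (hm : words ≠ [])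
    (hreqc : ∀ x, req.contains x = decide (x ∈ words))
    (hreqGet : ∀ w, req.get? w = if w ∈ words then some ((List.count w words : Int)) else none) :
    ∀ (N : Nat) (l : Int) (curr : PySem.Dict String Int) (ans : List Int),
      (n - t - l + 1).toNat ≤ N →
      off + k ≤ l → (k ∣ l - off) →
      (∀ w, curr.get? w = if w ∈ words ∧ w ∈ pvSeen s k t off l
          then some ((List.count w (pvWL s k t (l - k)) : Int)) else none) →
      pvFs4Loop n k t s req curr ans (pvCh s k (l - k)) l
        = (PySem.List.pyRange l (n - t + 1) k).foldl (fun ans l =>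
            if PySem.List.sorted ((PySem.List.pyRange l (l + t) k).map
                (fun j => PySem.Str.slice s (some j) (some (j + k)))) (fun w => w) false
              = PySem.List.sorted words (fun w => w) false
            then ans ++ [l] else ans) ans := by
  have hm1 : 1 ≤ words.length := List.length_pos_iff.2 hm
  have ht0 : k ≤ t := by
    rw [ht]
    nlinarith [hm1, hk, (by exact_mod_cast hm1 : (1:Int) ≤ (words.length : Int))]
  intro N
  induction N with
  | zero =>
    intro l curr ans hN h1 h2 Hcurr
    rw [pvFs4Loop]
    rw [dif_neg (by omega : ¬ k ≤ 0), dif_neg (by omega : ¬ l + t ≤ n),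
        pyRangeK_nil l (n - t + 1) k hk (by omega),
        List.foldl_nil]
  | succ N ih =>
    intro l curr ans hN h1 h2 Hcurr
    by_cases hr : l + t ≤ n
    · obtain ⟨d, hd⟩ := h2
      have hd0 : 0 ≤ d := by nlinarith
      obtain ⟨mN, hmN⟩ : ∃ mN : Nat, words.length = mN + 1 := ⟨words.length - 1, by omega⟩
      have hchr : PySem.Str.slice s (some (l + t - k)) (some (l + t)) = pvCh s k (l + t - k) := by
        unfold pvCh
        exact congrArg (fun z => PySem.Str.slice s (some (l + t - k)) (some z)) (by ring)
      have hWdec : pvWL s k t (l - k)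
          = pvCh s k (l - k) :: (PySem.List.pyRange l (l + t - k) k).map (pvCh s k) := by
        unfold pvWL
        rw [pyRangeK_cons (l - k) (l - k + t) k hk (by omega), List.map_cons,
            show l - k + k = l from by ring, show l - k + t = l + t - k from by ring]
      have hlenW : ∀ a : Int, (pvWL s k t a).length = words.length := by
        intro a
        unfold pvWL
        rw [show a + t = a + k * ((words.length : Nat) : Int) from by rw [ht],
            pyRangeK_eq a k hk words.length]
        simp
      have hWdec2 : pvWL s k t l
          = (PySem.List.pyRange l (l + t - k) k).map (pvCh s k) ++ [pvCh s k (l + t - k)] := by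
        unfold pvWL
        have e2 : l + t - k = l + k * ((mN : Nat) : Int) := by
          rw [ht, hmN]; push_cast; ring
        rw [show l + t = l + k * (((mN : Nat) : Int) + 1) from by rw [ht, hmN]; push_cast; ring,
            pyRangeK_snoc l k hk mN, List.map_append]
        simp only [List.map_cons, List.map_nil]
        rw [show l + k * (((mN : Nat) : Int) + 1) - k = l + k * ((mN : Nat) : Int) from by ring, ← e2]
      have hSdec : pvSeen s k t off (l + k)
          = pvSeen s k t off l ++ [pvCh s k (l + t - k)] := by
        unfold pvSeen
        have e4 : l + t - k = off + k * ((d.toNat + mN : Nat) : Int) := by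
          rw [ht, hmN]; push_cast; rw [Int.toNat_of_nonneg hd0]; linear_combination hd
        rw [show l + k + t - k = off + k * (((d.toNat + mN : Nat) : Int) + 1) from by
              rw [ht, hmN]; push_cast; rw [Int.toNat_of_nonneg hd0]; linear_combination hd,
            pyRangeK_snoc off k hk (d.toNat + mN), List.map_append, ← e4]
        simp
      have hleftS : pvCh s k (l - k) ∈ pvSeen s k t off l := by
        unfold pvSeen
        refine List.mem_map_of_mem ((PySem.List.mem_pyRange_iff_of_pos hk _).2
          ⟨by omega, by omega, ⟨d - 1, by linear_combination hd⟩⟩)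
      have hMidS : ∀ x ∈ (PySem.List.pyRange l (l + t - k) k).map (pvCh s k),
          x ∈ pvSeen s k t off l := by
        intro x hx
        unfold pvSeen
        obtain ⟨j, hj, rfl⟩ := List.mem_map.1 hx
        obtain ⟨hj1, hj2, e, he⟩ := (PySem.List.mem_pyRange_iff_of_pos hk _).1 hj
        exact List.mem_map_of_mem ((PySem.List.mem_pyRange_iff_of_pos hk _).2
          ⟨by omega, by omega, ⟨e + d, by linear_combination he + hd⟩⟩)
      have Hdec := dictDec words curr (pvSeen s k t off l)
        ((PySem.List.pyRange l (l + t - k) k).map (pvCh s k)) (pvCh s k (l - k)) hleftS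
        (fun w => by rw [Hcurr w, hWdec])
      have Hinc := dictInc words req _ (pvSeen s k t off l)
        ((PySem.List.pyRange l (l + t - k) k).map (pvCh s k)) (pvCh s k (l + t - k))
        hreqc hMidS Hdec
      have Hcurr2 : ∀ w,
          ((if req.contains (pvCh s k (l + t - k)) = true then
              (if curr.contains (pvCh s k (l - k)) = true then
                  curr.insert (pvCh s k (l - k))
                    (if curr.getD (pvCh s k (l - k)) 0 > 0 then
                      curr.getD (pvCh s k (l - k)) 0 - 1 else 0)
                else curr).insert (pvCh s k (l + t - k))
                (if (if curr.contains (pvCh s k (l - k)) = true then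
                      curr.insert (pvCh s k (l - k))
                        (if curr.getD (pvCh s k (l - k)) 0 > 0 then
                          curr.getD (pvCh s k (l - k)) 0 - 1 else 0)
                    else curr).contains (pvCh s k (l + t - k)) = true then
                  (if curr.contains (pvCh s k (l - k)) = true then
                      curr.insert (pvCh s k (l - k))
                        (if curr.getD (pvCh s k (l - k)) 0 > 0 then
                          curr.getD (pvCh s k (l - k)) 0 - 1 else 0)
                    else curr).getD (pvCh s k (l + t - k)) 0 + 1
                else 1)
            else
              (if curr.contains (pvCh s k (l - k)) = true then
                  curr.insert (pvCh s k (l - k))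
                    (if curr.getD (pvCh s k (l - k)) 0 > 0 then
                      curr.getD (pvCh s k (l - k)) 0 - 1 else 0)
                else curr))).get? w
          = if w ∈ words ∧ w ∈ pvSeen s k t off (l + k)
              then some ((List.count w (pvWL s k t (l + k - k)) : Int)) else none := by
        intro w
        rw [show l + k - k = l from by ring, hSdec, hWdec2]
        exact Hinc w
      have Hcurr2' := Hcurr2
      rw [show l + k - k = l from by ring] at Hcurr2'
      have hcheck := dictEqChar words req _ (pvWL s k t l) (pvSeen s k t off (l + k))
        hreqGet (by
          rw [hWdec2, hSdec]
          intro x hx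
          rcases List.mem_append.1 hx with h | h
          · exact List.mem_append.2 (Or.inl (hMidS x h))
          · exact List.mem_append.2 (Or.inr h)) (hlenW l) Hcurr2'
      have hsorted : (PySem.List.sorted ((PySem.List.pyRange l (l + t) k).map
            (fun j => PySem.Str.slice s (some j) (some (j + k)))) (fun w => w) false
          = PySem.List.sorted words (fun w => w) false) ↔ (pvWL s k t l).Perm words := by
        have hmp : (PySem.List.pyRange l (l + t) k).map
            (fun j => PySem.Str.slice s (some j) (some (j + k))) = pvWL s k t l := rfl
        rw [hmp]
        exact PySem.List.sorted_id_eq_sorted_id_iff_perm _ _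
      rw [pvFs4Loop, dif_neg (by omega : ¬ k ≤ 0), dif_pos hr]
      rw [hchr]
      rw [pyRangeK_cons l (n - t + 1) k hk (by omega)]
      simp only [List.foldl_cons]
      have hchl : PySem.Str.slice s (some l) (some (l + k)) = pvCh s k (l + k - k) := by
        rw [show l + k - k = l from by ring]; rfl
      rw [hchl]
      by_cases hg : (pvWL s k t l).Perm words
      · rw [if_pos (hcheck.2 hg), if_pos (hsorted.2 hg)]
        exact ih (l + k) _ _ (by omega) (by omega) ⟨d + 1, by linear_combination hd⟩ Hcurr2
      · rw [if_neg (fun hx => hg (hcheck.1 hx)), if_neg (fun hx => hg (hsorted.1 hx))]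
        exact ih (l + k) _ _ (by omega) (by omega) ⟨d + 1, by linear_combination hd⟩ Hcurr2
    · rw [pvFs4Loop]
      rw [dif_neg (by omega : ¬ k ≤ 0), dif_neg hr, pyRangeK_nil l (n - t + 1) k hk (by omega), List.foldl_nil]

lemma offsetEq (s : String) (words : List String) (req : PySem.Dict String Int)
    (n k t off : Int) (hk : 0 < k) (ht : t = k * (words.length : Int))
    (hm : words ≠ []) (hofft : off + t ≤ n)
    (hreqc : ∀ x, req.contains x = decide (x ∈ words))
    (hreqGet : ∀ w, req.get? w = if w ∈ words then some ((List.count w words : Int)) else none)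
    (ans : List Int) :
    findSubstring4 off n k t s req ans
      = (PySem.List.pyRange off (n - t + 1) k).foldl (fun ans l =>
            if PySem.List.sorted ((PySem.List.pyRange l (l + t) k).map
                (fun j => PySem.Str.slice s (some j) (some (j + k)))) (fun w => w) false
              = PySem.List.sorted words (fun w => w) false
            then ans ++ [l] else ans) ans := by
  have hm1 : 1 ≤ words.length := List.length_pos_iff.2 hm
  have ht0 : k ≤ t := by
    rw [ht]
    nlinarith [hm1, hk, (by exact_mod_cast hm1 : (1:Int) ≤ (words.length : Int))]
  simp only [findSubstring4]
  rw [show (fun (c : PySem.Dict String Int) (i : Int) =>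
        if req.contains (PySem.Str.slice s (some i) (some (i + k))) = true then
          c.insert (PySem.Str.slice s (some i) (some (i + k)))
            (if c.contains (PySem.Str.slice s (some i) (some (i + k))) = true then
              c.getD (PySem.Str.slice s (some i) (some (i + k))) 0 + 1 else 1)
        else c)
      = (fun c i => (fun (c : PySem.Dict String Int) x =>
          if req.contains x = true then
            c.insert x (if c.contains x = true then c.getD x 0 + 1 else 1) else c) c (pvCh s k i))
      from rfl,
    show (PySem.List.pyRange off (off + t) k).foldl (fun c i => (fun (c : PySem.Dict String Int) x =>
          if req.contains x = true then
            c.insert x (if c.contains x = true then c.getD x 0 + 1 else 1) else c) c (pvCh s k i))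
        PySem.Dict.empty
      = ((PySem.List.pyRange off (off + t) k).map (pvCh s k)).foldl
          (fun (c : PySem.Dict String Int) x =>
          if req.contains x = true then
            c.insert x (if c.contains x = true then c.getD x 0 + 1 else 1) else c)
        PySem.Dict.empty
      from (List.foldl_map (f := pvCh s k) (g := fun (c : PySem.Dict String Int) x =>
          if req.contains x = true then
            c.insert x (if c.contains x = true then c.getD x 0 + 1 else 1) else c)).symm,
    show (PySem.List.pyRange off (off + t) k).map (pvCh s k) = pvWL s k t off from rfl]
  have hfold := initCounter words req hreqc (pvWL s k t off)
  have hlenW : (pvWL s k t off).length = words.length := by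
    unfold pvWL
    rw [show off + t = off + k * ((words.length : Nat) : Int) from by rw [ht],
        pyRangeK_eq off k hk words.length]
    simp
  have hcheck := dictEqChar words req _ (pvWL s k t off) (pvWL s k t off)
    hreqGet (fun x h => h) hlenW hfold
  have hSeen0 : pvSeen s k t off (off + k) = pvWL s k t off := by
    unfold pvSeen pvWL
    rw [show off + k + t - k = off + t from by ring]
  have Hcurr1 : ∀ w, ((pvWL s k t off).foldl (fun (c : PySem.Dict String Int) x =>
        if req.contains x = true then
          c.insert x (if c.contains x = true then c.getD x 0 + 1 else 1) else c)
      PySem.Dict.empty).get? w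
      = if w ∈ words ∧ w ∈ pvSeen s k t off (off + k)
          then some ((List.count w (pvWL s k t (off + k - k)) : Int)) else none := by
    intro w
    rw [hSeen0, show off + k - k = off from by ring]
    exact hfold w
  have hsorted0 : (PySem.List.sorted ((PySem.List.pyRange off (off + t) k).map
        (fun j => PySem.Str.slice s (some j) (some (j + k)))) (fun w => w) false
      = PySem.List.sorted words (fun w => w) false) ↔ (pvWL s k t off).Perm words := by
    have hmp : (PySem.List.pyRange off (off + t) k).map
        (fun j => PySem.Str.slice s (some j) (some (j + k))) = pvWL s k t off := rfl
    rw [hmp]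
    exact PySem.List.sorted_id_eq_sorted_id_iff_perm _ _
  rw [pyRangeK_cons off (n - t + 1) k hk (by omega)]
  simp only [List.foldl_cons]
  have hchl : PySem.Str.slice s (some off) (some (off + k)) = pvCh s k (off + k - k) := by
    rw [show off + k - k = off from by ring]; rfl
  rw [hchl]
  by_cases hg : (pvWL s k t off).Perm words
  · rw [if_pos (hcheck.2 hg), if_pos (hsorted0.2 hg)]
    exact loopEq s words req n k t off hk ht hm hreqc hreqGet
      (n - t - (off + k) + 1).toNat (off + k) _ _ le_rfl le_rfl ⟨1, by ring⟩ Hcurr1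
  · rw [if_neg (fun hx => hg (hcheck.1 hx)), if_neg (fun hx => hg (hsorted0.1 hx))]
    exact loopEq s words req n k t off hk ht hm hreqc hreqGet
      (n - t - (off + k) + 1).toNat (off + k) _ _ le_rfl le_rfl ⟨1, by ring⟩ Hcurr1

-- ===== VERDICT (by name: the statement is the Claim_ definition above) =====
theorem findSubstring3_spec : Claim_equal_findSubstring3 := by
  intro s words _
  unfold Spec_findSubstring3
  simp only [findSubstring3, findSubstring3_alt]
  by_cases hguard : s = "" ∨ words = [] ∨ words.headD "" = ""
  · rw [if_pos hguard, if_pos hguard]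
  · rw [if_neg hguard, if_neg hguard]
    rw [not_or, not_or] at hguard
    obtain ⟨hs, hw, hw0⟩ := hguard
    have hk : 0 < PySem.Str.len (words.headD "") := by
      have h1 : PySem.Str.len (words.headD "") = ((words.headD "").toList.length : Int) := by
        simp [PySem.Str.len]
      have h2 : (words.headD "").toList ≠ [] := by simp_all
      have h3 : 0 < (words.headD "").toList.length := List.length_pos_iff.2 h2
      omega
    have ht : PySem.List.len words * PySem.Str.len (words.headD "")
        = PySem.Str.len (words.headD "") * (words.length : Int) := by
      rw [PySem.List.len_eq]; ring
    have hreqc : ∀ x, (words.foldl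
        (fun (d : PySem.Dict String Int) w =>
          d.insert w (if d.contains w then d.getD w 0 + 1 else 1))
        PySem.Dict.empty).contains x = decide (x ∈ words) := by
      intro x
      rw [PySem.Dict.contains_eq_isSome_get?, reqGet words x]
      by_cases h : x ∈ words
      · simp [h]
      · simp [h]
    refine PySem.List.foldl_congr_mem _ _ _ _ ?_
    intro acc off hmem
    rw [PySem.List.mem_pyRange_one] at hmem
    exact offsetEq s words _ (PySem.Str.len s) (PySem.Str.len (words.headD ""))
      (PySem.List.len words * PySem.Str.len (words.headD "")) off hk ht hw
      (by omega) hreqc (reqGet words) acc
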